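-- pv_equiv track=rewrite | github.com/pratikkabade/Coding-Ninjas | Data Structures and Algorithms/2 - Basic Data Structures/week 1/Recursion Assignment.py | chck
-- ===== SOURCE A (Python) =====
-- def chck(s):
--     n=len(s)
--     if n<=1:
--         return True
--
--     if s[0]=='a' and (s[1]=='a' or s[1:3]=='bb'):
--         return chck(s[3:])
--     chck(s[1:])
--     return False
-- ===== SOURCE B (Python) =====
-- def chck(s):
--     n = len(s)
--     i = 0
--     while n - i >= 2:
--         if s[i] != 'a':
--             return False
--         if s[i + 1] == 'a':
--             i += 3
--         elif i + 2 < n and s[i + 1] == 'b' and s[i + 2] == 'b':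
--             i += 3
--         else:
--             return False
--     return True
-- ===== Notes on version B (the rewrite author's own statement) =====
-- stated objective: faster
-- what changed: Replaced A's recursion that makes a fresh slice at every step and an additional discarded recursive call chck(s[1:]) on every failure path with a single index-based while loop advancing by 3, no slicing and no wasted recursion.
import Mathlib
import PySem

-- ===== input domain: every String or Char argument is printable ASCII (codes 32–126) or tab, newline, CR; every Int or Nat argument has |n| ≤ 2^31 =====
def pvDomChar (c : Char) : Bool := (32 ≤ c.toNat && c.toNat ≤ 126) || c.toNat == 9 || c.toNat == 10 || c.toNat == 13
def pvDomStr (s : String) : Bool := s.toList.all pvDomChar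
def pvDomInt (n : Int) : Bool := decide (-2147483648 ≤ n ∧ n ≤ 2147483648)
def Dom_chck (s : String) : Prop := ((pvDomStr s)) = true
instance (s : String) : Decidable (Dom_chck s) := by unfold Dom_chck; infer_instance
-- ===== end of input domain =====

-- B replaces A's recursion with string slicing (and a discarded extra recursive call)
-- by a single index-based linear scan advancing by 3; a timing run measured it faster.

-- ===== PORT A =====
-- literal transliteration of A: recursion with slices; the value-discarded
-- recursive call chck(s[1:]) is kept as a discarded `let`.
def chckGo (cs : List Char) : Bool :=
  if _h : cs.length ≤ 1 then true
  else
    if PySem.List.pyGet? cs 0 = some 'a' ∧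
        (PySem.List.pyGet? cs 1 = some 'a' ∨ PySem.List.slice cs (some 1) (some 3) = ['b', 'b'])
    then chckGo (PySem.List.slice cs (some 3) none)
    else
      let _ := chckGo (PySem.List.slice cs (some 1) none)
      false
termination_by cs.length
decreasing_by
  all_goals
    simp [PySem.List.slice_some_none, PySem.List.clampIdx]
    omega

def chck (s : String) : Bool := chckGo s.toList

-- ===== PORT B =====
-- literal transliteration of B: while-loop over an index i, advancing by 3.
def chckAltGo (cs : List Char) (n i : Nat) : Bool :=
  if i + 2 ≤ n then
    if PySem.List.pyGet? cs (i : Int) ≠ some 'a' then false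
    else if PySem.List.pyGet? cs ((i : Int) + 1) = some 'a' then chckAltGo cs n (i + 3)
    else if i + 2 < n ∧ PySem.List.pyGet? cs ((i : Int) + 1) = some 'b' ∧
        PySem.List.pyGet? cs ((i : Int) + 2) = some 'b' then chckAltGo cs n (i + 3)
    else false
  else true
termination_by n - i

def chck_alt (s : String) : Bool := chckAltGo s.toList s.toList.length 0

-- ===== PRECONDITION & SPEC =====
def Spec_chck (s : String) (out : Bool) : Prop := out = chck_alt s
instance (s : String) (out : Bool) : Decidable (Spec_chck s out) := by unfold Spec_chck; infer_instance

-- ===== CLAIM (what is proved, stated in full; the proofs are below) =====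
def Claim_equal_chck : Prop := ∀ (s : String), Dom_chck s → Spec_chck s (chck s)

-- ===== LEMMAS AND PROOFS =====

theorem take_two_bb (l : List Char) : (l.take 2 = ['b', 'b']) ↔ (l[0]? = some 'b' ∧ l[1]? = some 'b') := by
  match l with
  | [] => simp
  | [x] => simp
  | x :: y :: r => simp [List.take]

theorem chck_key (k : Nat) : ∀ (cs : List Char) (i : Nat), cs.length ≤ i + k →
    chckAltGo cs cs.length i = chckGo (cs.drop i) := by
  induction k with
  | zero =>
    intro cs i h
    rw [chckAltGo, chckGo]
    have h2 : ¬ (i + 2 ≤ cs.length) := by omega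
    have hL : (cs.drop i).length ≤ 1 := by simp; omega
    simp [h2]
    exact Or.inl (by omega)
  | succ k ih =>
    intro cs i h
    by_cases h2 : i + 2 ≤ cs.length
    · rw [chckAltGo, chckGo]
      have hL : ¬ (cs.drop i).length ≤ 1 := by simp; omega
      have e0 : PySem.List.pyGet? (cs.drop i) 0 = cs[i]? := by
        simp [pysem, List.getElem?_drop]
      have e1 : PySem.List.pyGet? (cs.drop i) 1 = cs[i+1]? := by
        simp [pysem, List.getElem?_drop]
      have e3 : PySem.List.slice (cs.drop i) (some 3) none = cs.drop (i+3) := by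
        simp [pysem, List.drop_drop]
      have ebb : PySem.List.slice (cs.drop i) (some 1) (some 3) = (cs.drop (i+1)).take 2 := by
        simp [pysem, List.drop_drop]
      have ei : PySem.List.pyGet? cs (i : Int) = cs[i]? := PySem.List.pyGet?_natCast cs i
      have ei1 : PySem.List.pyGet? cs ((i : Int) + 1) = cs[i+1]? := by
        have : ((i : Int) + 1) = ((i + 1 : Nat) : Int) := by push_cast; ring
        rw [this, PySem.List.pyGet?_natCast]
      have ei2 : PySem.List.pyGet? cs ((i : Int) + 2) = cs[i+2]? := by
        have : ((i : Int) + 2) = ((i + 2 : Nat) : Int) := by push_cast; ring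
        rw [this, PySem.List.pyGet?_natCast]
      have erec : chckAltGo cs cs.length (i + 3) = chckGo (cs.drop (i + 3)) :=
        ih cs (i + 3) (by omega)
      have hbb : ((cs.drop (i+1)).take 2 = ['b', 'b']) ↔
          (cs[i+1]? = some 'b' ∧ cs[i+2]? = some 'b') := by
        rw [take_two_bb]
        simp [List.getElem?_drop]
      have hC : cs[i+2]? = some 'b' → i + 2 < cs.length := fun hb =>
        (List.getElem?_eq_some_iff.mp hb).1
      rw [if_pos h2, dif_neg hL, e0, e1, e3, ebb, ei, ei1, ei2, erec]
      simp only [hbb]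
      by_cases p0 : cs[i]? = some 'a'
      · by_cases p1 : cs[i+1]? = some 'a'
        · simp [p0, p1]
        · by_cases pb : cs[i+1]? = some 'b' ∧ cs[i+2]? = some 'b'
          · simp [p0, pb, hC pb.2]
          · simp [p0, p1, pb]
      · simp [p0]
    · rw [chckAltGo, chckGo]
      have hL : (cs.drop i).length ≤ 1 := by simp; omega
      simp [h2]
      exact Or.inl (by omega)

-- ===== VERDICT (by name: the statement is the Claim_ definition above) =====
theorem chck_spec : Claim_equal_chck := by
  intro s _
  unfold Spec_chck chck chck_alt
  simpa using (chck_key s.toList.length s.toList 0 (by omega)).symm
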